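-- pv_equiv track=rewrite | github.com/Dharit13/QuantPulse | backend/api/swing_picks.py | _apply_sector_cap
-- ===== SOURCE A (Python) =====
-- def _apply_sector_cap(picks: list[dict], max_per_sector: int = 2) -> list[dict]:
--     """Enforce sector diversification: max N picks per sector."""
--     sector_count: dict[str, int] = {}
--     result: list[dict] = []
--     for p in picks:
--         sector = p.get("sector", "Unknown")
--         cnt = sector_count.get(sector, 0)
--         if cnt < max_per_sector:
--             result.append(p)
--             sector_count[sector] = cnt + 1
--     return result
-- ===== SOURCE B (Python) =====
-- def _apply_sector_cap(picks: list[dict], max_per_sector: int = 2) -> list[dict]: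
--     """Enforce sector diversification: max N picks per sector."""
--     def sector(p):
--         return p.get("sector", "Unknown")
--     return [p for i, p in enumerate(picks)
--             if sum(1 for q in picks[:i] if sector(q) == sector(p)) < max_per_sector]
-- ===== Notes on version B (the rewrite author's own statement) =====
-- stated objective: simpler
-- what changed: Replaces A's stateful loop with a mutable per-sector counter dict by a single stateless comprehension that keeps each pick iff the number of earlier picks with the same sector is below the cap.
import Mathlib
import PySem

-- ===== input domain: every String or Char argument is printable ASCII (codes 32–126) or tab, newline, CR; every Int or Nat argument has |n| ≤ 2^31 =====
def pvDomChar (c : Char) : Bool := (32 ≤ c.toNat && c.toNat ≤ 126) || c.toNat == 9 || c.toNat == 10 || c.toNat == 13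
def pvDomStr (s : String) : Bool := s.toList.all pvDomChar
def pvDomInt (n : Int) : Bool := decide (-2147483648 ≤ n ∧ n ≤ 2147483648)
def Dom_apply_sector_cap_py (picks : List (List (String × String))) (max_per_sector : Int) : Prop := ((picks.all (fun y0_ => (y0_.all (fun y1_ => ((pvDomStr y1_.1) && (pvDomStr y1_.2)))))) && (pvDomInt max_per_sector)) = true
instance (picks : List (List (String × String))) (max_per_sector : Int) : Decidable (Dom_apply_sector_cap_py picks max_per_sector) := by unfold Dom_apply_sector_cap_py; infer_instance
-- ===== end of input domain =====

-- B replaces A's incremental per-sector counter dict by a stateless comprehension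
-- that recounts earlier same-sector picks per element (objective: simpler).


-- p.get("sector", "Unknown") (first-match lookup on the association list)
def pvSect (p : List (String × String)) : String :=
  PySem.Dict.getD (PySem.Dict.mk p) "sector" "Unknown"

-- ===== PORT A =====
def apply_sector_cap_py (picks : List (List (String × String))) (max_per_sector : Int) : List (List (String × String)) :=
  (picks.foldl
    (fun (st : PySem.Dict String Int × List (List (String × String))) p =>
      let sector := pvSect p
      let cnt := st.1.getD sector 0
      if cnt < max_per_sector then (st.1.insert sector (cnt + 1), st.2 ++ [p]) else st)
    (PySem.Dict.empty, [])).2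

-- ===== PORT B =====
def apply_sector_cap_py_alt (picks : List (List (String × String))) (max_per_sector : Int) : List (List (String × String)) :=
  (PySem.List.enumerate picks 0).foldl
    (fun acc ip =>
      if ((PySem.List.slice picks none (some ip.1)).countP
            (fun q => pvSect q == pvSect ip.2) : Int) < max_per_sector
      then acc ++ [ip.2] else acc) []

-- ===== PRECONDITION & SPEC =====
def Spec_apply_sector_cap_py (picks : List (List (String × String))) (max_per_sector : Int) (out : List (List (String × String))) : Prop := out = apply_sector_cap_py_alt picks max_per_sector
instance (picks : List (List (String × String))) (max_per_sector : Int) (out : List (List (String × String))) : Decidable (Spec_apply_sector_cap_py picks max_per_sector out) := by unfold Spec_apply_sector_cap_py; infer_instance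

-- ===== CLAIM (what is proved, stated in full; the proofs are below) =====
def Claim_equal_apply_sector_cap_py : Prop := ∀ (picks : List (List (String × String))) (max_per_sector : Int), Dom_apply_sector_cap_py picks max_per_sector → Spec_apply_sector_cap_py picks max_per_sector (apply_sector_cap_py picks max_per_sector)

-- ===== LEMMAS AND PROOFS =====

-- number of picks in `pre` whose sector is s
def pvCnt (pre : List (List (String × String))) (s : String) : Int :=
  (pre.countP (fun q => pvSect q == s) : Int)

-- common specification: keep each pick whose earlier-same-sector count is < m
def pvFspec (m : Int) : List (List (String × String)) → List (List (String × String)) → List (List (String × String))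
  | _pre, [] => []
  | pre, x :: xs =>
      (if pvCnt pre (pvSect x) < m then [x] else []) ++ pvFspec m (pre ++ [x]) xs

theorem pvCnt_nonneg (pre : List (List (String × String))) (s : String) : 0 ≤ pvCnt pre s := by
  exact Int.natCast_nonneg _

theorem pvCnt_append_singleton (pre : List (List (String × String))) (x : List (String × String)) (s : String) :
    pvCnt (pre ++ [x]) s = pvCnt pre s + (if pvSect x = s then 1 else 0) := by
  simp [pvCnt, List.countP_append, List.countP_cons]

theorem pvA_inv (m : Int) (xs : List (List (String × String))) :
    ∀ (pre : List (List (String × String))) (d : PySem.Dict String Int)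
      (acc : List (List (String × String))),
      (∀ s, d.getD s 0 = min (pvCnt pre s) (max m 0)) →
      (xs.foldl
        (fun (st : PySem.Dict String Int × List (List (String × String))) p =>
          let sector := pvSect p
          let cnt := st.1.getD sector 0
          if cnt < m then (st.1.insert sector (cnt + 1), st.2 ++ [p]) else st)
        (d, acc)).2 = acc ++ pvFspec m pre xs := by
  induction xs with
  | nil => intro pre d acc _; simp [pvFspec]
  | cons x xs ih =>
    intro pre d acc hinv
    have hc := pvCnt_nonneg pre (pvSect x)
    have hx := hinv (pvSect x)
    simp only [List.foldl_cons]
    by_cases h : d.getD (pvSect x) 0 < m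
    · have hcm : pvCnt pre (pvSect x) < m := by omega
      rw [if_pos h]
      rw [ih (pre ++ [x]) _ (acc ++ [x]) ?_]
      · simp [pvFspec, hcm]
      · intro s
        rw [PySem.Dict.getD_insert, pvCnt_append_singleton]
        have hcs := pvCnt_nonneg pre s
        rcases eq_or_ne s (pvSect x) with h1 | h1
        · subst h1; rw [if_pos rfl, if_pos rfl, hx]; omega
        · rw [if_neg h1, if_neg (fun hh => h1 hh.symm)]
          have := hinv s; omega
    · have hcm : ¬ pvCnt pre (pvSect x) < m := by omega
      rw [if_neg h]
      rw [ih (pre ++ [x]) d acc ?_]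
      · simp [pvFspec, hcm]
      · intro s
        rw [pvCnt_append_singleton]
        have hs := hinv s
        have hcs := pvCnt_nonneg pre s
        rcases eq_or_ne (pvSect x) s with h1 | h1
        · rw [if_pos h1]; subst h1; omega
        · rw [if_neg h1]; omega

theorem pvB_inv (m : Int) (picks : List (List (String × String))) (xs : List (List (String × String))) :
    ∀ (pre : List (List (String × String))) (acc : List (List (String × String))),
      picks = pre ++ xs →
      ((PySem.List.enumerate xs (pre.length : Int)).foldl
        (fun acc ip =>
          if ((PySem.List.slice picks none (some ip.1)).countP
                (fun q => pvSect q == pvSect ip.2) : Int) < m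
          then acc ++ [ip.2] else acc) acc) = acc ++ pvFspec m pre xs := by
  induction xs with
  | nil => intro pre acc _; simp [pvFspec, PySem.List.enumerate_nil]
  | cons x xs ih =>
    intro pre acc hpk
    rw [PySem.List.enumerate_cons, List.foldl_cons]
    have hsl : PySem.List.slice picks none (some (pre.length : Int)) = pre := by
      rw [PySem.List.slice_to_natCast, hpk, List.take_left]
    have hlen : (pre.length : Int) + 1 = ((pre ++ [x]).length : Int) := by
      simp
    have hpk' : picks = (pre ++ [x]) ++ xs := by simp [hpk]
    by_cases h : pvCnt pre (pvSect x) < m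
    · rw [if_pos (by simpa [hsl, pvCnt] using h)]
      rw [hlen, ih (pre ++ [x]) (acc ++ [x]) hpk']
      simp [pvFspec, h]
    · rw [if_neg (by simpa [hsl, pvCnt] using h)]
      rw [hlen, ih (pre ++ [x]) acc hpk']
      simp [pvFspec, h]

-- ===== VERDICT (by name: the statement is the Claim_ definition above) =====
theorem apply_sector_cap_py_spec : Claim_equal_apply_sector_cap_py := by
  intro picks m _
  unfold Spec_apply_sector_cap_py apply_sector_cap_py apply_sector_cap_py_alt
  rw [pvA_inv m picks [] PySem.Dict.empty [] ?_]
  · have := pvB_inv m picks picks [] [] (by simp)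
    simpa using this.symm
  · intro s
    simp [pvCnt]
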